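-- pv_equiv track=rewrite | github.com/Coki628/kyopro_submissions | AtCoder/ARC109c6.py | doubling
-- ===== SOURCE A (Python) =====
-- def list2d(a, b, c): return [[c for j in range(b)] for i in range(a)]
--
-- def check(a, b):
--     if a == b:
--         return a
--     if a == 'R' and b == 'S' \
--             or a == 'S' and b == 'P' \
--             or a == 'P' and b == 'R':
--         return a
--     else:
--         return b
--
-- def doubling(MAX, A):
--     """ ダブリング """
--
--     N = len(A)
--     nxt = list2d(MAX, N, -1)
--     win = list2d(MAX, N, '')
--     for i, a in enumerate(A):
--         nxt[0][i] = (i+1) % N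
--         win[0][i] = a
--     for k in range(1, MAX):
--         for i in range(N):
--             nxt[k][i] = nxt[k-1][nxt[k-1][i]]
--             # ここで和とかmaxが欲しい時と同じ遷移をやる
--             win[k][i] = check(win[k-1][i], win[k-1][nxt[k-1][i]])
--     return (nxt, win)
-- ===== SOURCE B (Python) =====
-- def check(a, b):
--     if a == b:
--         return a
--     if a == 'R' and b == 'S' \
--             or a == 'S' and b == 'P' \
--             or a == 'P' and b == 'R':
--         return a
--     else:
--         return b
--
-- def doubling(MAX, A):
--     """One fused pass, no preallocated 2D tables and no per-element index arithmetic: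
--     each level's permutation is a cyclic ROTATION by the running offset (which doubles
--     mod N each level), so nxt rows are rotations of the identity list and win rows are
--     produced by zipping the previous row with its rotation."""
--     N = len(A)
--     ident = list(range(N))
--     off = 1 % N if N else 0
--     w = list(A)
--     nxt, win = [], []
--     for _ in range(MAX):
--         nxt.append(ident[off:] + ident[:off])
--         win.append(w)
--         w = [check(x, y) for x, y in zip(w, w[off:] + w[:off])]
--         off = off * 2 % N if N else 0
--     return (nxt, win)
-- ===== Notes on version B (the rewrite author's own statement) =====
-- stated objective: alternative
-- what changed: B discards A's two preallocated mutable 2D tables, its separate init loop and its nested k,i loops with per-element modular index lookups (nxt[k-1][nxt[k-1][i]]): it runs ONE fused pass that represents each level's shift permutation as a cyclic rotation by a running offset (doubled mod N per level), emitting every nxt row as a rotation of the identity list by slicing and every win row by zipping the previous row with its own rotation.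
import Mathlib
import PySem

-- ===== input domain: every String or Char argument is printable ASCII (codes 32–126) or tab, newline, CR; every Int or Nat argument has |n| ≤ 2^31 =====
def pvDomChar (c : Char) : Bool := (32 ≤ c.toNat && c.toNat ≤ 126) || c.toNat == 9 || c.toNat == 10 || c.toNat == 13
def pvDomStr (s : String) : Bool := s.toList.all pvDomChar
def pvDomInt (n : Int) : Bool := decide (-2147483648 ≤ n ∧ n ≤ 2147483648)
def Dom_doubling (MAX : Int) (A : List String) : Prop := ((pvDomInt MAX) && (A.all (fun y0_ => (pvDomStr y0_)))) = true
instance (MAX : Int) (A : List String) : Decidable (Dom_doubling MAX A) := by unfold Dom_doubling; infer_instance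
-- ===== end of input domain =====

-- B replaces A's preallocated 2D tables and nested indexed loops by one fused pass that emits
-- each level as a cyclic ROTATION (slices + zip) by a running offset doubled mod N (objective: alternative).
-- ===== PORT A =====
def pvCheck (a b : String) : String :=
  if a = b then a
  else if (a = "R" ∧ b = "S") ∨ (a = "S" ∧ b = "P") ∨ (a = "P" ∧ b = "R") then a
  else b

def pvList2d {α : Type} (a b : Int) (c : α) : List (List α) :=
  (PySem.List.pyRange 0 a 1).map (fun _ => (PySem.List.pyRange 0 b 1).map (fun _ => c))

-- tbl[k][i] read / write (total forms; every access made by A inside Pre_ is in range)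
def pvGet2 {α : Type} (t : List (List α)) (k i : Int) (d : α) : α :=
  PySem.List.pyGetD (PySem.List.pyGetD t k []) i d

def pvSet2 {α : Type} (t : List (List α)) (k i : Int) (v : α) : List (List α) :=
  PySem.List.pySetD t k (PySem.List.pySetD (PySem.List.pyGetD t k []) i v)

-- body of A's inner i-loop (assign nxt[k][i], then win[k][i], reading nxt as Python does)
def pvInner (k : Int) (s : List (List Int) × List (List String)) (i : Int) :
    List (List Int) × List (List String) :=
  let nxt1 := pvSet2 s.1 k i (pvGet2 s.1 (k-1) (pvGet2 s.1 (k-1) i (-1)) (-1))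
  let win1 := pvSet2 s.2 k i
      (pvCheck (pvGet2 s.2 (k-1) i "") (pvGet2 s.2 (k-1) (pvGet2 nxt1 (k-1) i (-1)) ""))
  (nxt1, win1)

def doubling (MAX : Int) (A : List String) : List (List Int) × List (List String) :=
  let N : Int := PySem.List.len A
  let nxt0 := pvList2d MAX N (-1 : Int)
  let win0 := pvList2d MAX N ""
  let s1 := (PySem.List.enumerate A 0).foldl
      (fun s p => (pvSet2 s.1 0 p.1 (PySem.Int.mod (p.1 + 1) N), pvSet2 s.2 0 p.1 p.2))
      (nxt0, win0)
  (PySem.List.pyRange 1 MAX 1).foldl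
      (fun s k => (PySem.List.pyRange 0 N 1).foldl (pvInner k) s) s1

-- ===== PORT B =====
-- B (Source B): one fused loop; state = (nxt rows so far, win rows so far, current win row w, offset);
-- each step: append ident[off:]+ident[:off] to nxt, append w to win, w := zip(w, w[off:]+w[:off])
-- mapped through check, off := off*2 % N (0 when N = 0).
def pvRot {α : Type} (l : List α) (off : Int) : List α :=
  PySem.List.slice l (some off) none ++ PySem.List.slice l none (some off)

def pvBStep (N : Int) (ident : List Int)
    (s : List (List Int) × List (List String) × List String × Int) :
    List (List Int) × List (List String) × List String × Int :=
  (s.1 ++ [pvRot ident s.2.2.2],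
   s.2.1 ++ [s.2.2.1],
   (s.2.2.1.zip (pvRot s.2.2.1 s.2.2.2)).map (fun p => pvCheck p.1 p.2),
   if N ≠ 0 then PySem.Int.mod (s.2.2.2 * 2) N else 0)

def doubling_alt (MAX : Int) (A : List String) : List (List Int) × List (List String) :=
  let N : Int := PySem.List.len A
  let ident : List Int := PySem.List.pyRange 0 N 1
  let off0 : Int := if N ≠ 0 then PySem.Int.mod 1 N else 0
  let st := (PySem.List.pyRange 0 MAX 1).foldl (fun s _ => pvBStep N ident s)
      ([], [], A, off0)
  (st.1, st.2.1)

-- ===== PRECONDITION & SPEC =====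
-- Pre_ excludes exactly the inputs where A raises: MAX < 1 with nonempty A makes list2d allocate
-- no rows, so the assignment nxt[0][i] is an IndexError.
def Pre_doubling (MAX : Int) (A : List String) : Prop := A = [] ∨ 1 ≤ MAX
instance (MAX : Int) (A : List String) : Decidable (Pre_doubling MAX A) := by unfold Pre_doubling; infer_instance
def pvWitness_doubling : Int × List String := (3, ["R", "P", "S"])

def Spec_doubling (MAX : Int) (A : List String) (out : List (List Int) × List (List String)) : Prop := out = doubling_alt MAX A
instance (MAX : Int) (A : List String) (out : List (List Int) × List (List String)) : Decidable (Spec_doubling MAX A out) := by unfold Spec_doubling; infer_instance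

-- ===== CLAIM (what is proved, stated in full; the proofs are below) =====
def Claim_equal_doubling : Prop := ∀ (MAX : Int) (A : List String), Dom_doubling MAX A → Pre_doubling MAX A → Spec_doubling MAX A (doubling MAX A)

-- ===== LEMMAS AND PROOFS =====

-- closed forms of row k of each table
def rowN (N : Int) (k : Nat) : List Int :=
  (PySem.List.pyRange 0 N 1).map (fun i => PySem.Int.mod (i + 2 ^ k) N)

def rowW (A : List String) : Nat → List String
  | 0 => A
  | k+1 => (PySem.List.pyRange 0 (PySem.List.len A) 1).map (fun i =>
      pvCheck (PySem.List.pyGetD (rowW A k) i "")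
              (PySem.List.pyGetD (rowW A k) (PySem.Int.mod (i + 2 ^ k) (PySem.List.len A)) ""))

-- generic list helpers
theorem pvSetGetSelf {a : Type} (l : List a) (k : Nat) (d : a) (h : k < l.length) :
    l.set k (l.getD k d) = l := by
  refine List.ext_getElem (by simp) ?_
  intro i h1 h2
  rw [List.getElem_set]
  split
  · next heq =>
    subst heq
    have : l.getD k d = l[k] := by
      simp [List.getD_eq_getElem?_getD, List.getElem?_eq_getElem h]
    rw [this]
  · rfl

theorem pvSetMid {a : Type} (l : List a) (c : a) (t : List a) (v : a) :
    (l ++ c :: t).set l.length v = l ++ v :: t := by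
  induction l with
  | nil => rfl
  | cons x l ih => simpa using ih

theorem pvSetMid' {a : Type} (l : List a) (c : a) (t : List a) (v : a) (n : Nat)
    (h : l.length = n) : (l ++ c :: t).set n v = l ++ v :: t := by
  subst h; exact pvSetMid l c t v

theorem pvGetDSetSelf {a : Type} (l : List (List a)) (k : Nat) (r : List a) (h : k < l.length) :
    (l.set k r).getD k [] = r := by
  simp [List.getD_eq_getElem?_getD, h]

theorem pvGetDSetNe {a : Type} (l : List (List a)) (i j : Nat) (r : List a) (h : i ≠ j) :
    (l.set i r).getD j [] = l.getD j [] := by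
  simp [List.getD_eq_getElem?_getD, List.getElem?_set_ne h]

theorem pvGetDMapRange {a : Type} (m : Nat) (f : Nat → List a) (j : Nat) (h : j < m) :
    ((List.range m).map f).getD j [] = f j := by
  simp [List.getD_eq_getElem?_getD, List.getElem?_map, List.getElem?_range h]

theorem pvGetDAppendRight {a : Type} (l t : List (List a)) (m : Nat) (h : l.length = m) :
    (l ++ t).getD m [] = t.getD 0 [] := by
  simp [List.getD_eq_getElem?_getD, List.getElem?_append_right (by omega : l.length ≤ m), h]

theorem pvGetDAppendLeft {a : Type} (l t : List (List a)) (j : Nat) (h : j < l.length) :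
    (l ++ t).getD j [] = l.getD j [] := by
  simp [List.getD_eq_getElem?_getD, List.getElem?_append_left h]

theorem pvGetDReplicate {a : Type} (q : Nat) (r : List a) (h : 0 < q) :
    (List.replicate q r).getD 0 [] = r := by
  cases q with
  | zero => omega
  | succ q => simp [List.replicate_succ]

theorem pvMapConstPyRange {a : Type} (b : Int) (c : a) :
    (PySem.List.pyRange 0 b 1).map (fun _ => c) = List.replicate b.toNat c := by
  rw [List.eq_replicate_iff]
  constructor
  · simp [PySem.List.length_pyRange_one]
  · intro x hx
    rcases List.mem_map.1 hx with ⟨_, _, rfl⟩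
    rfl

-- pvGet2/pvSet2 evaluation
theorem pvGet2_natCast {a : Type} (t : List (List a)) (r : Nat) (i : Int) (d : a) :
    pvGet2 t (r : Int) i d = PySem.List.pyGetD (t.getD r []) i d := by
  simp [pvGet2]

theorem pvSet2_natCast {a : Type} (t : List (List a)) (r : Nat) (i : Int) (v : a) :
    pvSet2 t (r : Int) i v = t.set r (PySem.List.pySetD (t.getD r []) i v) := by
  simp [pvSet2]

theorem pvSet2_zero {a : Type} (t : List (List a)) (i : Int) (v : a) :
    pvSet2 t 0 i v = t.set 0 (PySem.List.pySetD (t.getD 0 []) i v) := by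
  have h0 : ((0 : Nat) : Int) = (0 : Int) := by norm_num
  rw [← h0, pvSet2_natCast]

theorem pvModChain (N i c : Int) (hN : 0 < N) :
    PySem.Int.mod (PySem.Int.mod (i + c) N + c) N = PySem.Int.mod (i + c + c) N := by
  rw [PySem.Int.mod_eq_emod_of_pos hN, PySem.Int.mod_eq_emod_of_pos hN,
      PySem.Int.mod_eq_emod_of_pos hN]
  conv_rhs => rw [Int.add_emod (i + c) c]
  rw [Int.add_emod ((i + c) % N) c, Int.emod_emod_of_dvd _ dvd_rfl]

theorem pvRowNGet (N : Int) (k : Nat) (i : Int) (h0 : 0 ≤ i) (h1 : i < N) :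
    PySem.List.pyGetD (rowN N k) i (-1) = PySem.Int.mod (i + 2 ^ k) N := by
  rw [rowN, PySem.List.pyGetD_map_pyRange_of_nonneg _ _ _ _ h0 h1]

-- one execution of A's inner-loop body (k >= 1, index m, row k = pre ++ cur with |pre| = m)
theorem pvInner_eval (k : Nat) (hk : 1 ≤ k) (nt : List (List Int)) (wt : List (List String))
    (m : Nat) (pre1 : List Int) (c : Int) (cs : List Int)
    (pre2 : List String) (e : String) (es : List String)
    (h1 : nt.getD k [] = pre1 ++ c :: cs) (hp1 : pre1.length = m)
    (h2 : wt.getD k [] = pre2 ++ e :: es) (hp2 : pre2.length = m) :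
    pvInner (k : Int) (nt, wt) (m : Int)
    = (nt.set k (pre1 ++ (PySem.List.pyGetD (nt.getD (k-1) [])
                   (PySem.List.pyGetD (nt.getD (k-1) []) (m : Int) (-1)) (-1)) :: cs),
       wt.set k (pre2 ++ (pvCheck (PySem.List.pyGetD (wt.getD (k-1) []) (m : Int) "")
                   (PySem.List.pyGetD (wt.getD (k-1) [])
                     (PySem.List.pyGetD (nt.getD (k-1) []) (m : Int) (-1)) "")) :: es)) := by
  have hcast : (k : Int) - 1 = ((k - 1 : Nat) : Int) := by omega
  have hne : k ≠ k - 1 := by omega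
  subst hp1
  simp only [pvInner, hcast, pvGet2_natCast, pvSet2_natCast, PySem.List.pySetD_natCast]
  rw [h1, pvSetMid, h2, pvGetDSetNe _ _ _ _ hne,
      show pre1.length = pre2.length from by omega, pvSetMid]

-- A's inner i-loop as a whole
theorem pvInnerFold (k : Nat) (hk : 1 ≤ k) :
    ∀ (cur1 : List Int) (cur2 : List String) (m : Nat)
      (nt : List (List Int)) (wt : List (List String)) (pre1 : List Int) (pre2 : List String),
      k < nt.length → k < wt.length →
      nt.getD k [] = pre1 ++ cur1 → pre1.length = m →
      wt.getD k [] = pre2 ++ cur2 → pre2.length = m → cur2.length = cur1.length →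
      (PySem.List.pyRange (m : Int) ((m + cur1.length : Nat) : Int) 1).foldl
          (pvInner (k : Int)) (nt, wt)
      = (nt.set k (pre1 ++ (PySem.List.pyRange (m : Int) ((m + cur1.length : Nat) : Int) 1).map
            (fun i => PySem.List.pyGetD (nt.getD (k-1) [])
                        (PySem.List.pyGetD (nt.getD (k-1) []) i (-1)) (-1))),
         wt.set k (pre2 ++ (PySem.List.pyRange (m : Int) ((m + cur1.length : Nat) : Int) 1).map
            (fun i => pvCheck (PySem.List.pyGetD (wt.getD (k-1) []) i "")
               (PySem.List.pyGetD (wt.getD (k-1) [])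
                  (PySem.List.pyGetD (nt.getD (k-1) []) i (-1)) "")))) := by
  intro cur1
  induction cur1 with
  | nil =>
    intro cur2 m nt wt pre1 pre2 hn hw h1 hp1 h2 hp2 hlen
    have hcur2 : cur2 = [] := List.eq_nil_of_length_eq_zero (by simpa using hlen)
    subst hcur2
    have hrange : PySem.List.pyRange (m : Int) ((m + ([] : List Int).length : Nat) : Int) 1 = [] := by
      apply PySem.List.pyRange_one_eq_nil
      simp
    rw [hrange]
    simp only [List.foldl_nil, List.map_nil, List.append_nil]
    rw [List.append_nil] at h1 h2
    rw [← h1, ← h2, pvSetGetSelf _ _ _ hn, pvSetGetSelf _ _ _ hw]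
  | cons c cs ih =>
    intro cur2 m nt wt pre1 pre2 hn hw h1 hp1 h2 hp2 hlen
    obtain ⟨e, es, rfl⟩ : ∃ e es, cur2 = e :: es := by
      cases cur2 with
      | nil => simp at hlen
      | cons e es => exact ⟨e, es, rfl⟩
    have hlt : (m : Int) < ((m + (c :: cs).length : Nat) : Int) := by
      simp only [List.length_cons]; omega
    rw [PySem.List.pyRange_one_cons hlt, List.foldl_cons, List.map_cons,
        pvInner_eval k hk nt wt m pre1 c cs pre2 e es h1 hp1 h2 hp2]
    -- abbreviations for the two freshly written values
    set vN := PySem.List.pyGetD (nt.getD (k-1) [])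
        (PySem.List.pyGetD (nt.getD (k-1) []) (m : Int) (-1)) (-1) with hvN
    set vW := pvCheck (PySem.List.pyGetD (wt.getD (k-1) []) (m : Int) "")
        (PySem.List.pyGetD (wt.getD (k-1) [])
          (PySem.List.pyGetD (nt.getD (k-1) []) (m : Int) (-1)) "") with hvW
    have hmcast : (m : Int) + 1 = ((m + 1 : Nat) : Int) := by push_cast; ring
    have hhicast : ((m + (c :: cs).length : Nat) : Int) = (((m + 1) + cs.length : Nat) : Int) := by
      simp [List.length_cons]; push_cast; ring
    rw [hmcast, hhicast]
    have hIH := ih es (m + 1) (nt.set k (pre1 ++ vN :: cs)) (wt.set k (pre2 ++ vW :: es))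
        (pre1 ++ [vN]) (pre2 ++ [vW])
        (by simpa using hn) (by simpa using hw)
        (by rw [pvGetDSetSelf _ _ _ hn]; simp)
        (by simp [hp1])
        (by rw [pvGetDSetSelf _ _ _ hw]; simp)
        (by simp [hp2])
        (by simpa using hlen)
    have hne : k ≠ k - 1 := by omega
    rw [hIH]
    simp only [pvGetDSetNe _ _ _ _ hne, List.set_set, List.map_cons, List.append_assoc,
      List.cons_append, List.nil_append]
    rfl

-- A's initialisation loop (fills row 0)
theorem pvInitFold (Nv : Int) :
    ∀ (xs : List String) (s : Nat) (nt : List (List Int)) (wt : List (List String))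
      (pre1 cur1 : List Int) (pre2 cur2 : List String),
      0 < nt.length → 0 < wt.length →
      nt.getD 0 [] = pre1 ++ cur1 → pre1.length = s → cur1.length = xs.length →
      wt.getD 0 [] = pre2 ++ cur2 → pre2.length = s → cur2.length = xs.length →
      (PySem.List.enumerate xs (s : Int)).foldl
        (fun st p => (pvSet2 st.1 0 p.1 (PySem.Int.mod (p.1 + 1) Nv), pvSet2 st.2 0 p.1 p.2))
        (nt, wt)
      = (nt.set 0 (pre1 ++ (PySem.List.enumerate xs (s : Int)).map
            (fun p => PySem.Int.mod (p.1 + 1) Nv)),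
         wt.set 0 (pre2 ++ xs)) := by
  intro xs
  induction xs with
  | nil =>
    intro s nt wt pre1 cur1 pre2 cur2 hn hw h1 hp1 hc1 h2 hp2 hc2
    have hcur1 : cur1 = [] := List.eq_nil_of_length_eq_zero (by simpa using hc1)
    have hcur2 : cur2 = [] := List.eq_nil_of_length_eq_zero (by simpa using hc2)
    subst hcur1; subst hcur2
    rw [List.append_nil] at h1 h2
    simp only [PySem.List.enumerate_nil, List.foldl_nil, List.map_nil, List.append_nil]
    rw [← h1, ← h2, pvSetGetSelf _ _ _ hn, pvSetGetSelf _ _ _ hw]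
  | cons x xs ih =>
    intro s nt wt pre1 cur1 pre2 cur2 hn hw h1 hp1 hc1 h2 hp2 hc2
    obtain ⟨c, cs, rfl⟩ : ∃ c cs, cur1 = c :: cs := by
      cases cur1 with
      | nil => simp at hc1
      | cons c cs => exact ⟨c, cs, rfl⟩
    obtain ⟨e, es, rfl⟩ : ∃ e es, cur2 = e :: es := by
      cases cur2 with
      | nil => simp at hc2
      | cons e es => exact ⟨e, es, rfl⟩
    subst hp1
    rw [PySem.List.enumerate_cons, List.foldl_cons, List.map_cons]
    simp only [pvSet2_zero, PySem.List.pySetD_natCast]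
    rw [h1, pvSetMid, h2, show pre1.length = pre2.length from by omega, pvSetMid]
    have hs : ((pre2.length : Int)) + 1 = (((pre2.length + 1 : Nat)) : Int) := by push_cast; ring
    rw [hs]
    have hIH := ih (pre2.length + 1)
        (nt.set 0 (pre1 ++ PySem.Int.mod (((pre2.length + 1 : Nat) : Int)) Nv :: cs))
        (wt.set 0 (pre2 ++ x :: es))
        (pre1 ++ [PySem.Int.mod (((pre2.length + 1 : Nat) : Int)) Nv]) cs (pre2 ++ [x]) es
        (by simpa using hn) (by simpa using hw)
        (by rw [pvGetDSetSelf _ _ _ hn]; simp)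
        (by simp; omega)
        (by simpa using hc1)
        (by rw [pvGetDSetSelf _ _ _ hw]; simp)
        (by simp)
        (by simpa using hc2)
    simp only [pvSet2_zero, PySem.List.pySetD_natCast] at hIH
    have hmodcast : (PySem.Int.mod ((pre2.length : Int) + 1) Nv) = (PySem.Int.mod (((pre2.length + 1 : Nat) : Int)) Nv) := by rw [hs]
    rw [hmodcast] at *
    rw [hIH]
    simp only [List.set_set, List.append_assoc, List.cons_append, List.nil_append]

-- partially built tables after the first m levels
def tblN (N : Int) (M m : Nat) : List (List Int) :=
  (List.range m).map (rowN N) ++ List.replicate (M - m) (List.replicate N.toNat (-1))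

def tblW (A : List String) (M m : Nat) : List (List String) :=
  (List.range m).map (rowW A) ++ List.replicate (M - m) (List.replicate A.length "")

theorem pvTblNLength (N : Int) (M m : Nat) (h : m ≤ M) : (tblN N M m).length = M := by
  simp [tblN]; omega

theorem pvTblWLength (A : List String) (M m : Nat) (h : m ≤ M) : (tblW A M m).length = M := by
  simp [tblW]; omega

theorem pvRowNNil (k : Nat) : rowN 0 k = [] := by
  rw [rowN, PySem.List.pyRange_one_eq_nil (le_refl 0)]; rfl

theorem pvRowWNil (k : Nat) : rowW [] k = [] := by
  cases k with
  | zero => rfl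
  | succ k =>
    simp [rowW, PySem.List.len_eq, PySem.List.pyRange_one_eq_nil (le_refl (0:Int))]

theorem pvReplicateNilEq {a : Type} (M : Nat) (f : Nat → List a) (hf : ∀ k, f k = []) :
    List.replicate M ([] : List a) = (List.range M).map f := by
  symm
  rw [List.eq_replicate_iff]
  refine ⟨by simp, ?_⟩
  intro b hb
  rcases List.mem_map.1 hb with ⟨k, _, rfl⟩
  exact hf k

theorem pvRowNLen {a : Type} (r : List a) : PySem.List.len r = (r.length : Int) := by
  simp [PySem.List.len_eq]

-- A's outer k-loop
theorem pvOuterFold (A : List String) (hA : A ≠ []) (M : Nat) :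
    ∀ (m : Nat), 1 ≤ m → m ≤ M →
    (PySem.List.pyRange 1 (m : Int) 1).foldl
      (fun s k => (PySem.List.pyRange 0 ((A.length : Int)) 1).foldl (pvInner k) s)
      (tblN (A.length : Int) M 1, tblW A M 1)
    = (tblN (A.length : Int) M m, tblW A M m) := by
  intro m hm
  have hn0 : 0 < A.length := by
      cases A with
      | nil => exact absurd rfl hA
      | cons a t => simp
  have hNpos : (0 : Int) < (A.length : Int) := by exact_mod_cast hn0
  induction m, hm using Nat.le_induction with
  | base =>
    intro _
    rw [show PySem.List.pyRange 1 (((1 : Nat)) : Int) 1 = [] from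
      PySem.List.pyRange_one_eq_nil (by norm_num)]
    rfl
  | succ m hm ih =>
    intro hmM
    have hmM' : m < M := by omega
    have hc : ((m + 1 : Nat) : Int) = (m : Int) + 1 := by push_cast; ring
    rw [hc, PySem.List.pyRange_one_succ_right (by exact_mod_cast hm), List.foldl_append,
        ih (by omega), List.foldl_cons, List.foldl_nil]
    obtain ⟨m', rfl⟩ : ∃ m', m = m' + 1 := ⟨m - 1, by omega⟩
    -- evaluate the inner loop with pvInnerFold
    have hlenN : (tblN (A.length : Int) M (m' + 1)).length = M := pvTblNLength _ _ _ (by omega)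
    have hlenW : (tblW A M (m' + 1)).length = M := pvTblWLength _ _ _ (by omega)
    have hgetkN : (tblN (A.length : Int) M (m' + 1)).getD (m' + 1) [] =
        List.replicate A.length (-1 : Int) := by
      rw [tblN, pvGetDAppendRight _ _ _ (by simp), pvGetDReplicate _ _ (by omega)]
      simp
    have hgetkW : (tblW A M (m' + 1)).getD (m' + 1) [] = List.replicate A.length "" := by
      rw [tblW, pvGetDAppendRight _ _ _ (by simp), pvGetDReplicate _ _ (by omega)]
    have hgetpN : (tblN (A.length : Int) M (m' + 1)).getD (m' + 1 - 1) [] =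
        rowN (A.length : Int) m' := by
      rw [tblN, pvGetDAppendLeft _ _ _ (by simp), pvGetDMapRange _ _ _ (by omega)]
      simp
    have hgetpW : (tblW A M (m' + 1)).getD (m' + 1 - 1) [] = rowW A m' := by
      rw [tblW, pvGetDAppendLeft _ _ _ (by simp), pvGetDMapRange _ _ _ (by omega)]
      simp
    have hfold := pvInnerFold (m' + 1) (by omega)
        (List.replicate A.length (-1 : Int)) (List.replicate A.length "") 0
        (tblN (A.length : Int) M (m' + 1)) (tblW A M (m' + 1)) [] []
        (by omega) (by omega)
        (by rw [hgetkN]; simp) (by simp)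
        (by rw [hgetkW]; simp) (by simp) (by simp)
    simp only [List.length_replicate, Nat.zero_add, Nat.cast_zero, List.nil_append,
      hgetpN, hgetpW] at hfold
    rw [hfold]
    -- the freshly computed rows are the closed-form rows
    have hrowN : (PySem.List.pyRange 0 ((A.length : Int)) 1).map
        (fun i => PySem.List.pyGetD (rowN (A.length : Int) m')
          (PySem.List.pyGetD (rowN (A.length : Int) m') i (-1)) (-1))
        = rowN (A.length : Int) (m' + 1) := by
      conv_rhs => rw [rowN]
      apply List.map_congr_left
      intro i hi
      rw [PySem.List.mem_pyRange_one] at hi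
      obtain ⟨h0, h1⟩ := hi
      rw [pvRowNGet _ _ _ h0 h1]
      have hj0 : 0 ≤ PySem.Int.mod (i + 2 ^ m') (A.length : Int) := by
        rw [PySem.Int.mod_eq_emod_of_pos hNpos]; exact Int.emod_nonneg _ (by omega)
      have hj1 : PySem.Int.mod (i + 2 ^ m') (A.length : Int) < (A.length : Int) := by
        rw [PySem.Int.mod_eq_emod_of_pos hNpos]; exact Int.emod_lt_of_pos _ hNpos
      rw [pvRowNGet _ _ _ hj0 hj1, pvModChain _ _ _ hNpos]
      have hpow : (2 : Int) ^ m' + 2 ^ m' = 2 ^ (m' + 1) := by rw [pow_succ]; ring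
      rw [add_assoc, hpow]
    have hrowW : (PySem.List.pyRange 0 ((A.length : Int)) 1).map
        (fun i => pvCheck (PySem.List.pyGetD (rowW A m') i "")
          (PySem.List.pyGetD (rowW A m')
            (PySem.List.pyGetD (rowN (A.length : Int) m') i (-1)) ""))
        = rowW A (m' + 1) := by
      rw [rowW, pvRowNLen]
      apply List.map_congr_left
      intro i hi
      rw [PySem.List.mem_pyRange_one] at hi
      obtain ⟨h0, h1⟩ := hi
      rw [pvRowNGet _ _ _ h0 h1]
    rw [hrowN, hrowW]
    -- setting row m'+1 advances the partial tables one level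
    have hsetN : (tblN (A.length : Int) M (m' + 1)).set (m' + 1) (rowN (A.length : Int) (m' + 1))
        = tblN (A.length : Int) M (m' + 1 + 1) := by
      rw [tblN, tblN]
      have hrep : M - (m' + 1) = (M - (m' + 1 + 1)) + 1 := by omega
      rw [hrep, List.replicate_succ, pvSetMid' _ _ _ _ _ (by simp)]
      simp [List.range_succ]
    have hsetW : (tblW A M (m' + 1)).set (m' + 1) (rowW A (m' + 1))
        = tblW A M (m' + 1 + 1) := by
      rw [tblW, tblW]
      have hrep : M - (m' + 1) = (M - (m' + 1 + 1)) + 1 := by omega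
      rw [hrep, List.replicate_succ, pvSetMid' _ _ _ _ _ (by simp)]
      simp [List.range_succ]
    rw [hsetN, hsetW]

theorem pvSetReplicate {a : Type} (M : Nat) (hM : 1 ≤ M) (r v : List a) :
    (List.replicate M r).set 0 v = v :: List.replicate (M - 1) r := by
  cases M with
  | zero => omega
  | succ M0 => simp [List.replicate_succ]

theorem A_closed (MAX : Int) (A : List String) (h : Pre_doubling MAX A) :
    doubling MAX A =
      ((List.range MAX.toNat).map (rowN (PySem.List.len A)),
       (List.range MAX.toNat).map (rowW A)) := by
  by_cases hA : A = []
  · subst hA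
    simp only [doubling, PySem.List.len_eq, List.length_nil, Nat.cast_zero,
      PySem.List.enumerate_nil, List.foldl_nil]
    have h00 : PySem.List.pyRange 0 0 1 = ([] : List Int) :=
      PySem.List.pyRange_one_eq_nil (le_refl 0)
    simp only [h00, List.foldl_nil, PySem.List.foldl_ignore]
    rw [pvList2d, pvList2d]
    simp only [h00, List.map_nil]
    rw [pvMapConstPyRange, pvMapConstPyRange]
    refine Prod.ext ?_ ?_
    · exact pvReplicateNilEq _ _ pvRowNNil
    · exact pvReplicateNilEq _ _ pvRowWNil
  · have hMAX : 1 ≤ MAX := by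
      rcases h with h | h
      · exact absurd h hA
      · exact h
    have hn0 : 0 < A.length := by
      cases A with
      | nil => exact absurd rfl hA
      | cons a t => simp
    have hM1 : 1 ≤ MAX.toNat := by omega
    have hMcast : ((MAX.toNat : Nat) : Int) = MAX := Int.toNat_of_nonneg (by omega)
    simp only [doubling, PySem.List.len_eq]
    have hinit1 : pvList2d MAX ((A.length : Int)) (-1 : Int)
        = List.replicate MAX.toNat (List.replicate A.length (-1 : Int)) := by
      rw [pvList2d, pvMapConstPyRange]; simp [pvMapConstPyRange]
    have hinit2 : pvList2d MAX ((A.length : Int)) ""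
        = List.replicate MAX.toNat (List.replicate A.length "") := by
      rw [pvList2d, pvMapConstPyRange]; simp [pvMapConstPyRange]
    rw [hinit1, hinit2]
    have hinitf := pvInitFold ((A.length : Int)) A 0
        (List.replicate MAX.toNat (List.replicate A.length (-1 : Int)))
        (List.replicate MAX.toNat (List.replicate A.length ""))
        [] (List.replicate A.length (-1 : Int)) [] (List.replicate A.length "")
        (by simp; omega) (by simp; omega)
        (by rw [pvGetDReplicate _ _ (by omega)]; simp) rfl (by simp)
        (by rw [pvGetDReplicate _ _ (by omega)]; simp) rfl (by simp)
    simp only [Nat.cast_zero] at hinitf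
    rw [hinitf]
    have hrow0 : (PySem.List.enumerate A (0 : Int)).map
        (fun p => PySem.Int.mod (p.1 + 1) ((A.length : Int))) = rowN (A.length : Int) 0 := by
      rw [PySem.List.enumerate_eq_map_pyRange (d := ""), List.map_map, rowN]
      simp only [PySem.List.len_eq]
      apply List.map_congr_left
      intro j hj
      simp [pow_zero]
    rw [hrow0, pvSetReplicate _ hM1, pvSetReplicate _ hM1]
    have htbl1N : rowN (A.length : Int) 0 :: List.replicate (MAX.toNat - 1)
        (List.replicate A.length (-1 : Int)) = tblN (A.length : Int) MAX.toNat 1 := by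
      rw [tblN]; simp [List.range_one]
    have htbl1W : ([] : List String) ++ A = rowW A 0 := by simp [rowW]
    have htbl1W' : rowW A 0 :: List.replicate (MAX.toNat - 1) (List.replicate A.length "")
        = tblW A MAX.toNat 1 := by
      rw [tblW]; simp [List.range_one]
    rw [show ([] : List Int) ++ rowN (A.length : Int) 0 = rowN (A.length : Int) 0 from by simp,
        htbl1W, htbl1N, htbl1W']
    rw [show PySem.List.pyRange 1 MAX 1 = PySem.List.pyRange 1 ((MAX.toNat : Nat) : Int) 1 from by
      rw [hMcast]]
    rw [pvOuterFold A hA MAX.toNat MAX.toNat (by omega) (le_refl _)]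
    rw [tblN, tblW]
    simp

-- modular arithmetic for the running offset
theorem pvModAddMod (N i c : Int) (hN : 0 < N) :
    PySem.Int.mod (i + PySem.Int.mod c N) N = PySem.Int.mod (i + c) N := by
  rw [PySem.Int.mod_eq_emod_of_pos hN, PySem.Int.mod_eq_emod_of_pos hN,
      PySem.Int.mod_eq_emod_of_pos hN]
  conv_rhs => rw [Int.add_emod i c]
  rw [Int.add_emod i (c % N), Int.emod_emod_of_dvd _ dvd_rfl]

theorem pvModMulMod (N x : Int) (hN : 0 < N) :
    PySem.Int.mod (PySem.Int.mod x N * 2) N = PySem.Int.mod (x * 2) N := by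
  rw [PySem.Int.mod_eq_emod_of_pos hN, PySem.Int.mod_eq_emod_of_pos hN,
      PySem.Int.mod_eq_emod_of_pos hN]
  conv_rhs => rw [Int.mul_emod x 2]
  rw [Int.mul_emod (x % N) 2, Int.emod_emod_of_dvd _ dvd_rfl]

-- a list is the range-map of its own getD
theorem pvSelfMap {a : Type} (l : List a) (d : a) :
    l = (List.range l.length).map (fun i => l.getD i d) := by
  refine List.ext_getElem (by simp) ?_
  intro i h1 h2
  simp [List.getD_eq_getElem?_getD, List.getElem?_eq_getElem h1]

-- rotation by o positions, as a pointwise modular read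
theorem pvRotGet {a : Type} (l : List a) (d : a) (o : Nat) (ho : o ≤ l.length) :
    l.drop o ++ l.take o
      = (List.range l.length).map (fun i => l.getD ((i + o) % l.length) d) := by
  refine List.ext_getElem (by simp; omega) ?_
  intro i h1 h2
  have hn : i < l.length := by simpa using h2
  rw [List.getElem_map, List.getElem_range]
  by_cases hcase : i < l.length - o
  · rw [List.getElem_append_left (by simp; omega)]
    have hmod : (i + o) % l.length = i + o := Nat.mod_eq_of_lt (by omega)
    rw [List.getElem_drop, List.getD_eq_getElem?_getD, hmod,
        List.getElem?_eq_getElem (by omega : i + o < l.length)]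
    simp [Nat.add_comm o i]
  · rw [List.getElem_append_right (by simp; omega)]
    have hmod : (i + o) % l.length = i + o - l.length := by
      rw [Nat.mod_eq_sub_mod (by omega), Nat.mod_eq_of_lt (by omega)]
    rw [List.getElem_take, List.getD_eq_getElem?_getD, hmod,
        List.getElem?_eq_getElem (by omega : i + o - l.length < l.length)]
    simp only [Option.getD_some]
    congr 1
    simp
    omega

-- ident = pyRange 0 N 1 read as Nat range
theorem pvIdentEq (n : Nat) :
    PySem.List.pyRange 0 ((n : Nat) : Int) 1 = (List.range n).map (fun (i : Nat) => (i : Int)) := by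
  rw [PySem.List.pyRange_one]
  simp

-- general getD of a range-map
theorem pvGetDMapRange' {a : Type} (m : Nat) (f : Nat → a) (d : a) (j : Nat) (h : j < m) :
    ((List.range m).map f).getD j d = f j := by
  simp [List.getD_eq_getElem?_getD, List.getElem?_map, List.getElem?_range h]

-- zipping two maps over the same index list and mapping a binary function
theorem pvZipMapMap {a b : Type} (l : List Nat) (f g : Nat → a) (h : a → a → b) :
    (((l.map f).zip (l.map g)).map (fun p => h p.1 p.2)) = l.map (fun i => h (f i) (g i)) := by
  induction l with
  | nil => rfl
  | cons x l ih => simp [ih]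

-- zip a list with its own rotation and map a binary function: a pointwise modular read
theorem pvZipRot {a b : Type} (w : List a) (d : a) (o : Nat) (ho : o ≤ w.length)
    (h : a → a → b) :
    ((w.zip (w.drop o ++ w.take o)).map (fun p => h p.1 p.2))
      = (List.range w.length).map
          (fun i => h (w.getD i d) (w.getD ((i + o) % w.length) d)) := by
  conv_lhs => rw [pvRotGet w d o ho]
  nth_rewrite 1 [pvSelfMap w d]
  rw [pvZipMapMap]

theorem pvRowWLen (A : List String) (k : Nat) : (rowW A k).length = A.length := by
  cases k with
  | zero => rfl
  | succ k =>
    rw [rowW]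
    simp [PySem.List.length_pyRange_one, PySem.List.len_eq]

-- the modular-offset reading of level m's shift
theorem pvKey (A : List String) (hA : A ≠ []) (m : Nat) (i : Nat) :
    PySem.Int.mod ((i : Int) + 2 ^ m) (PySem.List.len A)
      = (((i + (PySem.Int.mod (2 ^ m) (PySem.List.len A)).toNat) % A.length : Nat) : Int) := by
  have hn0 : 0 < A.length := List.length_pos_of_ne_nil hA
  have hNpos : (0 : Int) < PySem.List.len A := by rw [pvRowNLen]; exact_mod_cast hn0
  have h0 : 0 ≤ PySem.Int.mod (2 ^ m) (PySem.List.len A) := PySem.Int.mod_nonneg _ hNpos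
  rw [← pvModAddMod _ _ _ hNpos,
      show PySem.Int.mod (2 ^ m) (PySem.List.len A)
         = (((PySem.Int.mod (2 ^ m) (PySem.List.len A)).toNat : Nat) : Int) from
        (Int.toNat_of_nonneg h0).symm,
      show ((i : Int) + (((PySem.Int.mod (2 ^ m) (PySem.List.len A)).toNat : Nat) : Int))
         = (((i + (PySem.Int.mod (2 ^ m) (PySem.List.len A)).toNat : Nat) : Int)) from by
        push_cast; ring,
      pvRowNLen]
  exact_mod_cast PySem.Int.mod_natCast _ _

-- a rotation of a list by a nonnegative offset, via the slice primitives
theorem pvRotEq {a : Type} (l : List a) (d : a) (off : Int) (h0 : 0 ≤ off)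
    (h1 : off.toNat ≤ l.length) :
    pvRot l off = (List.range l.length).map (fun i => l.getD ((i + off.toNat) % l.length) d) := by
  rw [pvRot, PySem.List.slice_from _ h0, PySem.List.slice_to _ h0]
  exact pvRotGet l d off.toNat h1

-- B's state after m iterations (nonempty A)
theorem pvBFold (A : List String) (hA : A ≠ []) (m : Nat) :
    (PySem.List.pyRange 0 ((m : Nat) : Int) 1).foldl
        (fun s _ => pvBStep (PySem.List.len A) (PySem.List.pyRange 0 (PySem.List.len A) 1) s)
        ([], [], A, if PySem.List.len A ≠ 0 then PySem.Int.mod 1 (PySem.List.len A) else 0)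
    = ((List.range m).map (rowN (PySem.List.len A)),
       (List.range m).map (rowW A),
       rowW A m,
       PySem.Int.mod (2 ^ m) (PySem.List.len A)) := by
  have hn0 : 0 < A.length := List.length_pos_of_ne_nil hA
  have hNpos : (0 : Int) < PySem.List.len A := by rw [pvRowNLen]; exact_mod_cast hn0
  have hNne : PySem.List.len A ≠ 0 := by omega
  have hidmap : PySem.List.pyRange 0 (PySem.List.len A) 1
      = (List.range A.length).map (fun (i : Nat) => (i : Int)) := by
    rw [pvRowNLen]; exact pvIdentEq A.length
  induction m with
  | zero =>
    rw [show PySem.List.pyRange 0 (((0 : Nat)) : Int) 1 = [] from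
      PySem.List.pyRange_one_eq_nil (by norm_num)]
    rw [List.foldl_nil, if_pos hNne]
    norm_num [rowW]
  | succ m ih =>
    have hc : ((m + 1 : Nat) : Int) = (m : Int) + 1 := by push_cast; ring
    rw [hc, PySem.List.pyRange_one_succ_right (by omega), List.foldl_append, ih,
        List.foldl_cons, List.foldl_nil]
    set off : Int := PySem.Int.mod (2 ^ m) (PySem.List.len A) with hoff
    have hoff0 : 0 ≤ off := PySem.Int.mod_nonneg _ hNpos
    have hoffN : off < PySem.List.len A := PySem.Int.mod_lt _ hNpos
    have hoffNat : off.toNat ≤ A.length := by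
      rw [pvRowNLen] at hoffN; omega
    have hidentlen : (PySem.List.pyRange 0 (PySem.List.len A) 1).length = A.length := by
      rw [PySem.List.length_pyRange_one, pvRowNLen]; omega
    -- the appended nxt row is the closed-form row m
    have hrotI : pvRot (PySem.List.pyRange 0 (PySem.List.len A) 1) off
        = rowN (PySem.List.len A) m := by
      rw [pvRotEq _ (0 : Int) off hoff0 (by rw [hidentlen]; exact hoffNat), hidentlen,
          rowN, hidmap, List.map_map]
      apply List.map_congr_left
      intro i hi
      rw [pvGetDMapRange' _ _ _ _ (Nat.mod_lt _ hn0), Function.comp_apply,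
          pvKey A hA m i, hoff]
    -- the new win row is the closed-form row m+1
    have hwlen : (rowW A m).length = A.length := pvRowWLen A m
    have hzip : (((rowW A m).zip (pvRot (rowW A m) off)).map (fun p => pvCheck p.1 p.2))
        = rowW A (m + 1) := by
      rw [pvRot, PySem.List.slice_from _ hoff0, PySem.List.slice_to _ hoff0,
          pvZipRot (rowW A m) "" off.toNat (by rw [hwlen]; exact hoffNat) pvCheck,
          hwlen, rowW, hidmap, List.map_map]
      apply List.map_congr_left
      intro i hi
      rw [Function.comp_apply, pvKey A hA m i, ← hoff]
      simp only [PySem.List.pyGetD_natCast, List.getD_eq_getElem?_getD]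
    rw [pvBStep, hrotI, hzip, if_pos hNne]
    refine Prod.ext (by simp [List.range_succ]) (Prod.ext (by simp [List.range_succ]) ?_)
    simp only
    refine Prod.ext rfl ?_
    simp only [hoff]
    rw [pvModMulMod _ _ hNpos, ← pow_succ]

-- the fold does nothing on an empty A
theorem pvBFoldNil (m : Nat) :
    (PySem.List.pyRange 0 ((m : Nat) : Int) 1).foldl
        (fun s _ => pvBStep 0 ([] : List Int) s)
        ([], [], ([] : List String), 0)
    = (List.replicate m ([] : List Int), List.replicate m ([] : List String), [], 0) := by
  induction m with
  | zero =>
    rw [show PySem.List.pyRange 0 (((0 : Nat)) : Int) 1 = [] from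
      PySem.List.pyRange_one_eq_nil (by norm_num)]
    rfl
  | succ m ih =>
    have hc : ((m + 1 : Nat) : Int) = (m : Int) + 1 := by push_cast; ring
    rw [hc, PySem.List.pyRange_one_succ_right (by omega), List.foldl_append, ih,
        List.foldl_cons, List.foldl_nil]
    have hrot : pvRot ([] : List Int) 0 = [] := by
      rw [pvRot, PySem.List.slice_from _ (le_refl 0), PySem.List.slice_to _ (le_refl 0)]; rfl
    rw [pvBStep, hrot]
    simp [List.replicate_succ']

theorem B_closed (MAX : Int) (A : List String) :
    doubling_alt MAX A =
      ((List.range MAX.toNat).map (rowN (PySem.List.len A)),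
       (List.range MAX.toNat).map (rowW A)) := by
  have hr0 : PySem.List.pyRange 0 MAX 1 = PySem.List.pyRange 0 ((MAX.toNat : Nat) : Int) 1 := by
    by_cases h : 0 ≤ MAX
    · rw [Int.toNat_of_nonneg h]
    · rw [PySem.List.pyRange_one_eq_nil (by omega), PySem.List.pyRange_one_eq_nil (by omega)]
  by_cases hA : A = []
  · subst hA
    simp only [doubling_alt]
    rw [hr0]
    have hN0 : PySem.List.len ([] : List String) = 0 := by simp [PySem.List.len_eq]
    simp only [hN0, if_neg (by simp : ¬ (0 : Int) ≠ 0),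
      show PySem.List.pyRange 0 (0 : Int) 1 = ([] : List Int) from
        PySem.List.pyRange_one_eq_nil (le_refl 0)]
    rw [pvBFoldNil]
    refine Prod.ext ?_ ?_
    · exact pvReplicateNilEq _ _ pvRowNNil
    · exact pvReplicateNilEq _ _ pvRowWNil
  · simp only [doubling_alt]
    rw [hr0, pvBFold A hA MAX.toNat]

-- ===== VERDICT (by name: the statement is the Claim_ definition above) =====
theorem doubling_spec : Claim_equal_doubling := by
  intro MAX A _ hPre
  unfold Spec_doubling
  rw [A_closed MAX A hPre, B_closed]
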